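-- pv_equiv track=rewrite | github.com/thefakejj/tiralabra | src/lz.py | init_decode
-- ===== SOURCE A (Python) =====
-- def init_decode(table: list):
--     result = ""
--     for pair in table:
--         if pair == None:
--             continue
--         if pair[0] != 0:
--             iter = pair
--             stack = []
--             while iter[0] != 0:
--                 stack.append(iter[1])
--                 iter = table[iter[0]]
--             stack.append(pair[1])
--             while len(stack) > 0:
--                 result += stack.pop()
--             continue
--         result += pair[1]
--     return result
-- ===== SOURCE B (Python) =====
-- def init_decode(table: list):
--     # One forward DP pass: ref_str[i] = expansion of the back-reference chain at i
--     # (valid because references point to strictly earlier entries), then one pass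
--     # emitting each pair's contribution.
--     n = len(table)
--     ref_str = [""] * n
--     for i in range(n):
--         pair = table[i]
--         if pair is not None and pair[0] != 0:
--             ref_str[i] = ref_str[pair[0]] + pair[1]
--     parts = []
--     for pair in table:
--         if pair is None:
--             continue
--         ref, char = pair
--         parts.append(char if ref == 0 else char + ref_str[ref] + char)
--     return "".join(parts)
-- ===== Notes on version B (the rewrite author's own statement) =====
-- stated objective: alternative
-- what changed: A walks each pair's back-reference chain with a per-pair stack and pops it in reverse; B does one forward dynamic-programming pass tabulating each entry's chain expansion (valid since references point to earlier entries), then emits all contributions in a single pass joined at the end.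
-- outside the precondition, e.g. on init_decode([(1, 'a'), (2, 'b'), (3, 'c'), (0, 'z')]): A returns 'acbabcbccz', B returns 'ababcbccz'
import Mathlib
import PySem

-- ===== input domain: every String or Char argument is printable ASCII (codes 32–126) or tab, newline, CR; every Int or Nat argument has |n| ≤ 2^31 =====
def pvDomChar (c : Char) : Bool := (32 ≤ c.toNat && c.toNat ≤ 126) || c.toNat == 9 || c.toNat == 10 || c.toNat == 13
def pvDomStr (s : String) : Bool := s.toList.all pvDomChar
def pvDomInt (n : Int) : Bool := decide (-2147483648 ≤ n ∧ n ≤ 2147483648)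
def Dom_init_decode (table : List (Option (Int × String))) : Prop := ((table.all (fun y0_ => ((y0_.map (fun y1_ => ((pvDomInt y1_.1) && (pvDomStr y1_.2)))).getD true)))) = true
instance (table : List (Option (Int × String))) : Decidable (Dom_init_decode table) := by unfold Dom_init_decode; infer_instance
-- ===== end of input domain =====

-- B replaces A's per-pair backward stack walk by a single forward DP pass that tabulates each
-- entry's back-reference expansion, then emits all contributions in one pass (objective: alternative).

-- ===== PORT A =====
-- the inner `while iter[0] != 0` loop: pushes iter[1], then follows table[iter[0]];
-- fuel (table.length + 1) is a totality guard only — under Pre_ the chain is strictly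
-- index-decreasing, so the fuel is never exhausted
def pvWalkA (table : List (Option (Int × String))) : Nat → (Int × String) → List String → List String
  | 0, _, stack => stack
  | fuel + 1, iter, stack =>
    if iter.1 ≠ 0 then
      match PySem.List.pyGet? table iter.1 with
      | some (some next) => pvWalkA table fuel next (iter.2 :: stack)
      | _ => iter.2 :: stack   -- Python raises here (None entry / bad index); outside Pre_
    else stack

def init_decode (table : List (Option (Int × String))) : String :=
  table.foldl
    (fun result pair =>
      match pair with
      | none => result
      | some p =>
        if p.1 ≠ 0 then
          -- stack = pair[1] :: walked chain (top first); the second while pops it all into result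
          (p.2 :: pvWalkA table (table.length + 1) p []).foldl (fun r s => r ++ s) result
        else result ++ p.2)
    ""

-- ===== PORT B =====
-- body of Source B's first loop: `if pair is not None and pair[0] != 0: ref_str[i] = ref_str[pair[0]] + pair[1]`
def pvDPStep (table : List (Option (Int × String))) (acc : List String) (i : Int) : List String :=
  match PySem.List.pyGet? table i with
  | some (some p) =>
    if p.1 ≠ 0 then acc.set i.toNat ((PySem.List.pyGet? acc p.1).getD "" ++ p.2) else acc
  | _ => acc

-- Source B: ref_str = [""] * n; for i in range(n): …
def pvRefStr (table : List (Option (Int × String))) : List String :=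
  (PySem.List.pyRange 0 (table.length : Int)).foldl (pvDPStep table) (List.replicate table.length "")

def init_decode_alt (table : List (Option (Int × String))) : String :=
  let refStr := pvRefStr table
  let parts : List String :=
    table.foldl
      (fun parts pair =>
        match pair with
        | none => parts
        | some p =>
          parts ++ [if p.1 = 0 then p.2
                    else p.2 ++ (PySem.List.pyGet? refStr p.1).getD "" ++ p.2])
      []
  PySem.Str.join "" parts

-- ===== PRECONDITION & SPEC =====
-- the index a (possibly negative, Python-style) reference r designates
def pvWidx (table : List (Option (Int × String))) (r : Int) : Nat :=
  (if r < 0 then r + table.length else r).toNat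

-- `pvReferencedB table j` = some entry of the table back-references index j
def pvReferencedB (table : List (Option (Int × String))) (j : Nat) : Bool :=
  table.any fun e =>
    (e.map fun p : Int × String => decide (p.1 ≠ 0) && decide (pvWidx table p.1 = j)).getD false

-- Pre_ excludes tables with an out-of-range or None-targeted back-reference (A raises
-- IndexError/TypeError there) and tables in which some back-REFERENCED entry has a
-- forward/self reference to a non-root entry (there A loops forever or walks a chain
-- whose entries B's single forward tabulation pass has not yet finalized) — outside the
-- natural LZ back-reference domain (chains point backwards, ending at a root); in-range
-- negative references wrap like all Python indexing and are admitted.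
def Pre_init_decode (table : List (Option (Int × String))) : Prop :=
  ∀ pr ∈ table.zipIdx, ∀ p : Int × String, pr.1 = some p → p.1 ≠ 0 →
    -(table.length : Int) ≤ p.1 ∧ p.1 < (table.length : Int) ∧
    (table[pvWidx table p.1]?.getD none).isSome = true ∧
    (pvReferencedB table pr.2 = true →
      pvWidx table p.1 < pr.2 ∨
        ((table[pvWidx table p.1]?.getD none).map (fun q => decide (q.1 = 0))).getD false = true)
instance (table : List (Option (Int × String))) : Decidable (Pre_init_decode table) := by
  unfold Pre_init_decode; infer_instance

def pvWitness_init_decode : (List (Option (Int × String))) :=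
  [none, some (0, "a"), some (1, "b"), some (4, "c"), some (0, "d")]

def Spec_init_decode (table : List (Option (Int × String))) (out : String) : Prop := out = init_decode_alt table
instance (table : List (Option (Int × String))) (out : String) : Decidable (Spec_init_decode table out) := by unfold Spec_init_decode; infer_instance

-- ===== CLAIM (what is proved, stated in full; the proofs are below) =====
def Claim_equal_init_decode : Prop := ∀ (table : List (Option (Int × String))), Dom_init_decode table → Pre_init_decode table → Spec_init_decode table (init_decode table)

-- ===== LEMMAS AND PROOFS =====

-- the ideal expansion of the back-reference chain at index i (total by strict index descent)
def pvR (table : List (Option (Int × String))) : Nat → String := fun i =>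
  match table[i]? with
  | some (some p) =>
    if h : p.1 ≠ 0 ∧ pvWidx table p.1 < i then pvR table (pvWidx table p.1) ++ p.2
    else if p.1 ≠ 0 then p.2 else ""   -- under Pre_ this is a reference to a root entry
  | _ => ""
termination_by i => i
decreasing_by exact h.2

def pvJ (l : List String) : String := l.foldl (fun a b => a ++ b) ""

theorem pv_pyGet_nat {α : Type} (l : List α) (k : Nat) :
    PySem.List.pyGet? l (k : Int) = l[k]? := by
  simp only [PySem.List.pyGet?, PySem.List.pyIdx?]
  split_ifs with h1 h2 h3 <;> simp_all

theorem pv_widx_lt {table : List (Option (Int × String))} {r : Int}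
    (h1 : -(table.length : Int) ≤ r) (h2 : r < (table.length : Int)) :
    pvWidx table r < table.length := by
  unfold pvWidx; split_ifs <;> omega

theorem pv_pyGet_widx {α : Type} (l : List α) (table : List (Option (Int × String))) (r : Int)
    (hl : l.length = table.length)
    (h1 : -(table.length : Int) ≤ r) (h2 : r < (table.length : Int)) :
    PySem.List.pyGet? l r = l[pvWidx table r]? := by
  simp only [PySem.List.pyGet?, PySem.List.pyIdx?, hl]
  by_cases h0 : 0 ≤ r
  · rw [if_pos h0, if_pos (by omega)]
    simp only [Option.bind]
    congr 1
    unfold pvWidx; split_ifs <;> omega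
  · rw [if_neg h0, if_pos (by omega)]
    simp only [Option.bind]
    congr 1
    unfold pvWidx; split_ifs <;> omega

theorem pv_foldl_append_init (l : List String) : ∀ r : String,
    l.foldl (fun a b => a ++ b) r = r ++ pvJ l := by
  induction l with
  | nil => intro r; simp only [pvJ, List.foldl_nil]; exact String.append_empty.symm
  | cons x l ih =>
    intro r
    simp only [pvJ, List.foldl_cons, String.empty_append]
    rw [ih (r ++ x), ih x, String.append_assoc]

theorem pvJ_cons (x : String) (l : List String) : pvJ (x :: l) = x ++ pvJ l := by
  simp only [pvJ, List.foldl_cons, String.empty_append]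
  exact pv_foldl_append_init l x

theorem pv_ref_of {table : List (Option (Int × String))} {i : Nat} {p : Int × String}
    (hi : table[i]? = some (some p)) (hnz : p.1 ≠ 0) :
    pvReferencedB table (pvWidx table p.1) = true := by
  unfold pvReferencedB
  rw [List.any_eq_true]
  exact ⟨some p, List.mem_iff_getElem?.2 ⟨i, hi⟩, by simp [hnz]⟩

theorem pv_pre_spec {table : List (Option (Int × String))} (hpre : Pre_init_decode table)
    {i : Nat} {p : Int × String} (hi : table[i]? = some (some p)) (hnz : p.1 ≠ 0) :
    -(table.length : Int) ≤ p.1 ∧ p.1 < (table.length : Int) ∧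
      (∃ q, table[pvWidx table p.1]? = some (some q)) ∧
      (pvReferencedB table i = true →
        ∃ q, table[pvWidx table p.1]? = some (some q) ∧ (pvWidx table p.1 < i ∨ q.1 = 0)) := by
  have hmem : ((some p : Option (Int × String)), i) ∈ table.zipIdx := by
    rw [List.mem_zipIdx_iff_getElem?]; exact hi
  obtain ⟨h1, h2, h3, h4⟩ := hpre (some p, i) hmem p rfl hnz
  obtain ⟨q, hq⟩ : ∃ q, table[pvWidx table p.1]? = some (some q) := by
    cases hq : table[pvWidx table p.1]? with
    | none => simp [hq] at h3
    | some o =>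
      cases o with
      | none => simp [hq] at h3
      | some q => exact ⟨q, rfl⟩
  refine ⟨h1, h2, ⟨q, hq⟩, fun href => ⟨q, hq, ?_⟩⟩
  rcases h4 href with h | h
  · exact Or.inl h
  · right
    simpa [hq] using h

theorem pv_walk_join {table : List (Option (Int × String))} (hpre : Pre_init_decode table) :
    ∀ (fuel i : Nat) (p : Int × String) (stack : List String),
      table[i]? = some (some p) → pvReferencedB table i = true → i < fuel →
      pvJ (pvWalkA table fuel p stack) = pvR table i ++ pvJ stack := by
  intro fuel
  induction fuel with
  | zero => intro i p stack _ _ h; omega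
  | succ f ih =>
    intro i p stack hi hrefi hif
    by_cases hnz : p.1 ≠ 0
    · obtain ⟨h1, h2, _, h4⟩ := pv_pre_spec hpre hi hnz
      obtain ⟨q, hq, hor⟩ := h4 hrefi
      have hget : PySem.List.pyGet? table p.1 = some (some q) := by
        rw [pv_pyGet_widx table table p.1 rfl h1 h2]; exact hq
      by_cases hlt : pvWidx table p.1 < i
      · have hRi : pvR table i = pvR table (pvWidx table p.1) ++ p.2 := by
          rw [pvR]; simp only [hi]; rw [dif_pos ⟨hnz, hlt⟩]
        simp only [pvWalkA, if_pos hnz, hget]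
        rw [ih (pvWidx table p.1) q (p.2 :: stack) hq (pv_ref_of hi hnz) (by omega), pvJ_cons, hRi,
          String.append_assoc]
      · have hq0 : q.1 = 0 := by
          rcases hor with h | h
          · omega
          · exact h
        have hstop : pvWalkA table f q (p.2 :: stack) = p.2 :: stack := by
          cases f with
          | zero => rfl
          | succ f' => simp [pvWalkA, hq0]
        have hRi : pvR table i = p.2 := by
          rw [pvR]; simp only [hi]
          rw [dif_neg (fun hh => hlt hh.2), if_pos hnz]
        simp only [pvWalkA, if_pos hnz, hget]
        rw [hstop, pvJ_cons, hRi]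
    · simp only [not_not] at hnz
      have hw : pvWalkA table (f + 1) p stack = stack := by simp [pvWalkA, hnz]
      have hr : pvR table i = "" := by rw [pvR]; simp [hi, hnz]
      rw [hw, hr, String.empty_append]

def pvAcc (table : List (Option (Int × String))) (k : Nat) : List String :=
  List.foldl (pvDPStep table) (List.replicate table.length "")
    (List.map (fun j : Nat => (j : Int)) (List.range k))

theorem pv_dp_inv {table : List (Option (Int × String))} (hpre : Pre_init_decode table) :
    ∀ k, k ≤ table.length →
      (pvAcc table k).length = table.length ∧
      ∀ j < table.length, pvReferencedB table j = true →
        (pvAcc table k)[j]? = some (if j < k then pvR table j else "") := by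
  intro k
  induction k with
  | zero =>
    intro _
    refine ⟨by simp [pvAcc], ?_⟩
    intro j hj _
    simp [pvAcc, hj]
  | succ k ih =>
    intro hk
    obtain ⟨hlen, hinv⟩ := ih (Nat.le_of_succ_le hk)
    have hkn : k < table.length := hk
    have hacc : pvAcc table (k + 1) = pvDPStep table (pvAcc table k) (k : Int) := by
      unfold pvAcc
      rw [List.range_succ, List.map_append, List.foldl_append, List.map_cons, List.map_nil, List.foldl_cons, List.foldl_nil]
    obtain ⟨x, htk⟩ : ∃ x, table[k]? = some x :=
      ⟨table[k], List.getElem?_eq_getElem hkn⟩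
    have hstep : PySem.List.pyGet? table ((k : Nat) : Int) = some x := by
      rw [pv_pyGet_nat]; exact htk
    match x, htk with
    | none, htk =>
      have hred : pvDPStep table (pvAcc table k) (k : Int) = pvAcc table k := by
        unfold pvDPStep; rw [hstep]
      rw [hacc, hred]
      refine ⟨hlen, ?_⟩
      intro j hj hrefj
      rw [hinv j hj hrefj]
      have hRk : pvR table k = "" := by rw [pvR]; simp [htk]
      by_cases hjk : j = k
      · subst hjk; simp [hRk]
      · have hiff : j < k + 1 ↔ j < k := by omega
        simp only [hiff]
    | some p, htk =>
      by_cases hnz : p.1 ≠ 0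
      · obtain ⟨h1, h2, _, h4⟩ := pv_pre_spec hpre htk hnz
        have hrefr : pvReferencedB table (pvWidx table p.1) = true := pv_ref_of htk hnz
        have hred : pvDPStep table (pvAcc table k) (k : Int)
            = (pvAcc table k).set k
                ((PySem.List.pyGet? (pvAcc table k) p.1).getD "" ++ p.2) := by
          unfold pvDPStep; rw [hstep]
          simp [hnz]
        rw [hacc, hred]
        refine ⟨by rw [List.length_set]; exact hlen, ?_⟩
        intro j hj hrefj
        by_cases hjk : j = k
        · have hrefk : pvReferencedB table k = true := hjk ▸ hrefj
          obtain ⟨q, hq, hor⟩ := h4 hrefk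
          have hlook : (PySem.List.pyGet? (pvAcc table k) p.1).getD ""
              = pvR table (pvWidx table p.1) := by
            rw [pv_pyGet_widx _ table p.1 hlen h1 h2, hinv (pvWidx table p.1) (pv_widx_lt h1 h2) hrefr]
            by_cases hltk : pvWidx table p.1 < k
            · simp [hltk]
            · have hq0 : q.1 = 0 := by
                rcases hor with h | h
                · omega
                · exact h
              have hR0 : pvR table (pvWidx table p.1) = "" := by
                rw [pvR]; simp [hq, hq0]
              simp [hltk, hR0]
          have hRk : pvR table k = pvR table (pvWidx table p.1) ++ p.2 := by
            by_cases hltk : pvWidx table p.1 < k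
            · rw [pvR]; simp only [htk]; rw [dif_pos ⟨hnz, hltk⟩]
            · have hq0 : q.1 = 0 := by
                rcases hor with h | h
                · omega
                · exact h
              have hR0 : pvR table (pvWidx table p.1) = "" := by
                rw [pvR]; simp [hq, hq0]
              rw [pvR]; simp only [htk]
              rw [dif_neg (fun hh => hltk hh.2), if_pos hnz, hR0, String.empty_append]
          rw [hjk, List.getElem?_set_self (by omega), hlook, if_pos (by omega), hRk]
        · rw [List.getElem?_set_ne (fun h => hjk h.symm), hinv j hj hrefj]
          have hiff : j < k + 1 ↔ j < k := by omega
          simp only [hiff]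
      · simp only [not_not] at hnz
        have hred : pvDPStep table (pvAcc table k) (k : Int) = pvAcc table k := by
          unfold pvDPStep; rw [hstep]
          simp [hnz]
        rw [hacc, hred]
        refine ⟨hlen, ?_⟩
        intro j hj hrefj
        rw [hinv j hj hrefj]
        have hRk : pvR table k = "" := by rw [pvR]; simp [htk, hnz]
        by_cases hjk : j = k
        · subst hjk; simp [hRk]
        · have hiff : j < k + 1 ↔ j < k := by omega
          simp only [hiff]

theorem pv_refStr_spec {table : List (Option (Int × String))} (hpre : Pre_init_decode table) :
    (pvRefStr table).length = table.length ∧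
      ∀ j < table.length, pvReferencedB table j = true →
        (pvRefStr table)[j]? = some (pvR table j) := by
  have hacc : pvRefStr table = pvAcc table table.length := by
    unfold pvRefStr pvAcc
    rw [PySem.List.pyRange_zero_natCast]
  obtain ⟨hlen, hinv⟩ := pv_dp_inv hpre table.length (le_refl _)
  rw [hacc]
  refine ⟨hlen, ?_⟩
  intro j hj hrefj
  rw [hinv j hj hrefj, if_pos hj]

-- the per-entry contributions of the two ports
def pvContribA (table : List (Option (Int × String))) (pair : Option (Int × String)) : String :=
  match pair with
  | none => ""
  | some p => if p.1 ≠ 0 then pvJ (p.2 :: pvWalkA table (table.length + 1) p []) else p.2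

def pvContribB (table : List (Option (Int × String))) (pair : Option (Int × String)) : List String :=
  match pair with
  | none => []
  | some p => [if p.1 = 0 then p.2
               else p.2 ++ (PySem.List.pyGet? (pvRefStr table) p.1).getD "" ++ p.2]

theorem pv_foldl_f {α : Type} (f : α → String) : ∀ (l : List α) (res : String),
    l.foldl (fun r x => r ++ f x) res = res ++ pvJ (l.map f) := by
  intro l
  induction l with
  | nil => intro res; simp only [List.map_nil, pvJ, List.foldl_nil]; exact String.append_empty.symm
  | cons x l ih =>
    intro res
    rw [List.foldl_cons, ih, List.map_cons, pvJ_cons, String.append_assoc]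

theorem pvJ_singleton (x : String) : pvJ [x] = x := by
  simp only [pvJ, List.foldl_cons, List.foldl_nil, String.empty_append]

theorem pvJ_append (l1 l2 : List String) : pvJ (l1 ++ l2) = pvJ l1 ++ pvJ l2 := by
  simp only [pvJ, List.foldl_append]
  exact pv_foldl_append_init l2 (pvJ l1)

theorem pv_join_empty : ∀ parts : List String, PySem.Str.join "" parts = pvJ parts
  | [] => by
    simp only [PySem.Str.join, List.map_nil, pvJ, List.foldl_nil]
    have : ("" : String).toList = [] := rfl
    rw [this, PySem.Chars.join_nil]
  | [x] => by
    simp only [PySem.Str.join, List.map_cons, List.map_nil, pvJ, List.foldl_cons, List.foldl_nil,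
      String.empty_append]
    have : ("" : String).toList = [] := rfl
    rw [this, PySem.Chars.join_singleton, String.ofList_toList]
  | x :: y :: t => by
    have ih := pv_join_empty (y :: t)
    simp only [PySem.Str.join, List.map_cons] at ih ⊢
    have h0 : ("" : String).toList = [] := rfl
    rw [h0] at ih ⊢
    rw [PySem.Chars.join_cons_cons, List.append_nil, String.ofList_append, String.ofList_toList, ih,
      pvJ_cons x (y :: t), pvJ_cons y t]

theorem pvJ_map_flatMap {α : Type} (f : α → String) (g : α → List String) :
    ∀ l : List α, (∀ x ∈ l, f x = pvJ (g x)) → pvJ (l.map f) = pvJ (l.flatMap g) := by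
  intro l
  induction l with
  | nil => intro _; rfl
  | cons a l ih =>
    intro h
    rw [List.map_cons, List.flatMap_cons, pvJ_cons, pvJ_append,
      h a (List.mem_cons_self), ih (fun x hx => h x (List.mem_cons_of_mem a hx))]

theorem init_decode_spec' (table : List (Option (Int × String))) (hpre : Pre_init_decode table) :
    init_decode table = init_decode_alt table := by
  obtain ⟨hlen, href⟩ := pv_refStr_spec hpre
  have hA : init_decode table = pvJ (table.map (pvContribA table)) := by
    unfold init_decode
    rw [PySem.List.foldl_congr_mem table _ (fun r pr => r ++ pvContribA table pr) ""
      (by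
        intro acc x _
        cases x with
        | none => simp [pvContribA]
        | some p =>
          by_cases hz : p.1 ≠ 0
          · simp only [pvContribA, if_pos hz]
            exact pv_foldl_append_init _ acc
          · simp only [pvContribA, if_neg hz])]
    rw [pv_foldl_f, String.empty_append]
  have hB : init_decode_alt table = pvJ (table.flatMap (pvContribB table)) := by
    have h0 : init_decode_alt table
        = PySem.Str.join ""
            (table.foldl
              (fun parts pair =>
                match pair with
                | none => parts
                | some p =>
                  parts ++ [if p.1 = 0 then p.2
                            else p.2 ++ (PySem.List.pyGet? (pvRefStr table) p.1).getD "" ++ p.2])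
              []) := rfl
    rw [h0,
      PySem.List.foldl_congr_mem table _ (fun parts pr => parts ++ pvContribB table pr) []
      (by
        intro acc x _
        cases x with
        | none => simp [pvContribB]
        | some p => simp [pvContribB]),
      PySem.List.foldl_append_eq_flatMap, List.nil_append, pv_join_empty]
  rw [hA, hB]
  apply pvJ_map_flatMap
  intro pair hmem
  obtain ⟨i, hi⟩ := List.mem_iff_getElem?.1 hmem
  have hin : i < table.length := by
    rcases List.getElem?_eq_some_iff.1 hi with ⟨h, _⟩; exact h
  cases pair with
  | none => rfl
  | some p =>
    by_cases hnz : p.1 ≠ 0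
    · obtain ⟨h1, h2, hq3, _⟩ := pv_pre_spec hpre hi hnz
      obtain ⟨q, hq⟩ := hq3
      have hrefr : pvReferencedB table (pvWidx table p.1) = true := pv_ref_of hi hnz
      have hget : PySem.List.pyGet? table p.1 = some (some q) := by
        rw [pv_pyGet_widx table table p.1 rfl h1 h2]; exact hq
      have hstep1 : pvWalkA table (table.length + 1) p []
          = pvWalkA table table.length q [p.2] := by
        simp [pvWalkA, hnz, hget]
      have hwalkr : pvJ (pvWalkA table table.length q [p.2])
          = pvR table (pvWidx table p.1) ++ pvJ [p.2] :=
        pv_walk_join hpre table.length (pvWidx table p.1) q [p.2] hq hrefr (pv_widx_lt h1 h2)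
      have hlook : (PySem.List.pyGet? (pvRefStr table) p.1).getD "" = pvR table (pvWidx table p.1) := by
        rw [pv_pyGet_widx _ table p.1 hlen h1 h2, href (pvWidx table p.1) (pv_widx_lt h1 h2) hrefr]
        rfl
      simp only [pvContribA, pvContribB, if_pos hnz, if_neg hnz]
      rw [pvJ_singleton, pvJ_cons, hstep1, hwalkr, pvJ_singleton, hlook, String.append_assoc]
    · simp only [not_not] at hnz
      simp only [pvContribA, pvContribB, hnz]
      simp [pvJ_singleton]

-- ===== VERDICT (by name: the statement is the Claim_ definition above) =====
theorem init_decode_spec : Claim_equal_init_decode := by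
  unfold Claim_equal_init_decode
  intro table _ hpre
  exact init_decode_spec' table hpre
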